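-- pv_equiv track=rewrite | github.com/davidarule/edge-c2-sim | scripts/ais_postprocess.py | get_ship_category
-- ===== SOURCE A (Python) =====
-- SHIP_TYPE_MAP = {
--     range(20, 30): "Wing in Ground",
--     range(30, 36): "Fishing / Towing / Dredging",
--     range(36, 40): "Sailing / Pleasure / HSC",
--     range(40, 50): "High Speed Craft",
--     range(50, 60): "Pilot / SAR / Tug / Port Tender / Anti-pollution / Law / Medical",
--     range(60, 70): "Passenger",
--     range(70, 80): "Cargo",
--     range(80, 90): "Tanker",
--     range(90, 100): "Other",
-- }
--
-- def get_ship_category(type_code):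
--     """Map AIS ship type code to a category string."""
--     if not type_code:
--         return "Unknown"
--     try:
--         code = int(type_code)
--     except (ValueError, TypeError):
--         return "Unknown"
--     for code_range, category in SHIP_TYPE_MAP.items():
--         if code in code_range:
--             return category
--     return f"Type {code}"
-- ===== SOURCE B (Python) =====
-- BUCKET_MAP = {
--     2: "Wing in Ground",
--     4: "High Speed Craft",
--     5: "Pilot / SAR / Tug / Port Tender / Anti-pollution / Law / Medical",
--     6: "Passenger",
--     7: "Cargo",
--     8: "Tanker",
--     9: "Other",
-- }
--
-- def get_ship_category(type_code):
--     """Map AIS ship type code to a category string."""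
--     if not type_code:
--         return "Unknown"
--     try:
--         code = int(type_code)
--     except (ValueError, TypeError):
--         return "Unknown"
--     if 30 <= code < 36:
--         return "Fishing / Towing / Dredging"
--     if 36 <= code < 40:
--         return "Sailing / Pleasure / HSC"
--     cat = BUCKET_MAP.get(code // 10)
--     return cat if cat is not None else f"Type {code}"
-- ===== Notes on version B (the rewrite author's own statement) =====
-- stated objective: idiomatic
-- what changed: Replaces the linear scan over the range-keyed SHIP_TYPE_MAP with a direct tens-digit bucket computed by code // 10 and looked up in a plain dict, with the non-uniform 30s band handled by two explicit comparisons.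
import Mathlib
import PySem

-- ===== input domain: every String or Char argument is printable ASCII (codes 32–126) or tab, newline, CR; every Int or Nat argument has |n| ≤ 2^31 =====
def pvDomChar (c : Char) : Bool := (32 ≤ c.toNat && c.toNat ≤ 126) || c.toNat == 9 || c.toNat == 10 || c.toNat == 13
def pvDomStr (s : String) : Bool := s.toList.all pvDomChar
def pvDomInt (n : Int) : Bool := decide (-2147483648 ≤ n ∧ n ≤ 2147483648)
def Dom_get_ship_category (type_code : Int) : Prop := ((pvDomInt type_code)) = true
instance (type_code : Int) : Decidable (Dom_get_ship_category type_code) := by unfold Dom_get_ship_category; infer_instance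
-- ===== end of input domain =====

-- B replaces A's scan over the range-keyed map with a tens-digit bucket (code // 10)
-- looked up in a plain dict, the non-uniform 30s band handled explicitly (idiomatic).

-- ===== PORT A =====
-- SHIP_TYPE_MAP: ranges represented as (lo, hi) half-open bounds, in insertion order.
def shipTypeMap : List ((Int × Int) × String) :=
  [((20, 30), "Wing in Ground"),
   ((30, 36), "Fishing / Towing / Dredging"),
   ((36, 40), "Sailing / Pleasure / HSC"),
   ((40, 50), "High Speed Craft"),
   ((50, 60), "Pilot / SAR / Tug / Port Tender / Anti-pollution / Law / Medical"),
   ((60, 70), "Passenger"),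
   ((70, 80), "Cargo"),
   ((80, 90), "Tanker"),
   ((90, 100), "Other")]

-- the for-loop over SHIP_TYPE_MAP.items(): first matching range wins, else f"Type {code}"
def shipScan (code : Int) : List ((Int × Int) × String) → String
  | [] => "Type " ++ PySem.Int.toStr code
  | ((lo, hi), cat) :: rest =>
      if lo ≤ code ∧ code < hi then cat else shipScan code rest

def get_ship_category (type_code : Int) : String :=
  if type_code = 0 then "Unknown"        -- 'if not type_code'; int(type_code) is the identity on int
  else shipScan type_code shipTypeMap

-- ===== PORT B =====
def bucketMap : PySem.Dict Int String :=
  PySem.Dict.ofList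
    [(2, "Wing in Ground"),
     (4, "High Speed Craft"),
     (5, "Pilot / SAR / Tug / Port Tender / Anti-pollution / Law / Medical"),
     (6, "Passenger"),
     (7, "Cargo"),
     (8, "Tanker"),
     (9, "Other")]

def get_ship_category_alt (type_code : Int) : String :=
  if type_code = 0 then "Unknown"
  else if 30 ≤ type_code ∧ type_code < 36 then "Fishing / Towing / Dredging"
  else if 36 ≤ type_code ∧ type_code < 40 then "Sailing / Pleasure / HSC"
  else
    match PySem.Dict.get? bucketMap (PySem.Int.floordiv type_code 10) with
    | some cat => cat
    | none => "Type " ++ PySem.Int.toStr type_code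

-- ===== PRECONDITION & SPEC =====
def Spec_get_ship_category (type_code : Int) (out : String) : Prop := out = get_ship_category_alt type_code
instance (type_code : Int) (out : String) : Decidable (Spec_get_ship_category type_code out) := by unfold Spec_get_ship_category; infer_instance

-- ===== CLAIM (what is proved, stated in full; the proofs are below) =====
def Claim_equal_get_ship_category : Prop := ∀ (type_code : Int), Dom_get_ship_category type_code → Spec_get_ship_category type_code (get_ship_category type_code)

-- ===== LEMMAS AND PROOFS =====

theorem bucketMap_eq : bucketMap = PySem.Dict.mk
    [(2, "Wing in Ground"), (4, "High Speed Craft"),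
     (5, "Pilot / SAR / Tug / Port Tender / Anti-pollution / Law / Medical"), (6, "Passenger"),
     (7, "Cargo"), (8, "Tanker"), (9, "Other")] := by rfl

theorem bucket_none (q : Int) (h2 : q ≠ 2) (h4 : q ≠ 4) (h5 : q ≠ 5) (h6 : q ≠ 6)
    (h7 : q ≠ 7) (h8 : q ≠ 8) (h9 : q ≠ 9) : PySem.Dict.get? bucketMap q = none := by
  rw [bucketMap_eq]
  simp [PySem.Dict.get?, Ne.symm h2, Ne.symm h4, Ne.symm h5, Ne.symm h6,
    Ne.symm h7, Ne.symm h8, Ne.symm h9]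

-- out-of-band codes: both sides fall through to "Type {code}"
theorem out_of_band (c : Int) (h0 : ¬ c = 0) (hout : c < 20 ∨ 100 ≤ c) :
    get_ship_category c = get_ship_category_alt c := by
  have hf : PySem.Int.floordiv c 10 = c / 10 :=
    PySem.Int.floordiv_eq_ediv_of_pos (by omega)
  have hn : PySem.Dict.get? bucketMap (c / 10) = none :=
    bucket_none _ (by omega) (by omega) (by omega) (by omega) (by omega) (by omega) (by omega)
  simp only [get_ship_category, get_ship_category_alt, hf, hn, if_neg h0]
  simp [shipScan, shipTypeMap]
  split_ifs <;> first | rfl | omega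

-- ===== VERDICT (by name: the statement is the Claim_ definition above) =====
theorem get_ship_category_spec : Claim_equal_get_ship_category := by
  intro c _
  unfold Spec_get_ship_category
  by_cases h0 : c = 0
  · simp [get_ship_category, get_ship_category_alt, h0]
  by_cases hin : 20 ≤ c ∧ c < 100
  · -- in-band codes: finitely many, evaluate both sides
    obtain ⟨hl, hr⟩ := hin
    interval_cases c <;> decide
  · exact out_of_band c h0 (by omega)
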